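-- pv_equiv track=rewrite | github.com/Yzoni/leren_2015-2016 | leren5/schrijvenopdracht3.py | get_partialdataset
-- ===== SOURCE A (Python) =====
-- def get_partialdataset(x_data, y_data, y_class):
--     index_list = []
--     for index, class_in_y in enumerate(y_data):
--         if class_in_y == y_class:
--             index_list.append(index)
--     newx = []
--     newy = []
--     for index in index_list:
--         newx.append(x_data[index])
--         newy.append(y_data[index])
--     return newx, newy
-- ===== SOURCE B (Python) =====
-- def get_partialdataset(x_data, y_data, y_class):
--     newx = []
--     newy = []
--     for index, class_in_y in enumerate(y_data):
--         if class_in_y == y_class: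
--             newx.append(x_data[index])
--             newy.append(class_in_y)
--     return newx, newy
-- ===== Notes on version B (the rewrite author's own statement) =====
-- stated objective: simpler
-- what changed: B filters and gathers in one pass over enumerate(y_data), dropping A's intermediate index_list and its separate second gathering loop.
-- outside the precondition, e.g. on get_partialdataset([], [3], 3): A raises IndexError, B raises IndexError
import Mathlib
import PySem

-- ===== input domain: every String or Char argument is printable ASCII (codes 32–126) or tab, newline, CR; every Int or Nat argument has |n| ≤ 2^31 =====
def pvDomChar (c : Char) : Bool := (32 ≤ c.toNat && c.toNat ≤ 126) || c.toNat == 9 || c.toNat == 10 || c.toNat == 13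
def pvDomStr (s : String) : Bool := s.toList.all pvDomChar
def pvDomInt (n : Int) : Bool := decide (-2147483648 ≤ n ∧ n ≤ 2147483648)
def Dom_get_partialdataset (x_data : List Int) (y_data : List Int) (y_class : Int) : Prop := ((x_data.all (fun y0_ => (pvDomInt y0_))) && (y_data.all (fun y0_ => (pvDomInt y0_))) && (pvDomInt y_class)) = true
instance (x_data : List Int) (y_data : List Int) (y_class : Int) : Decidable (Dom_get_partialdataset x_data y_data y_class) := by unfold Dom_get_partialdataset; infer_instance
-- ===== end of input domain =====

-- ===== PORT A =====
-- A: build index_list of positions whose class matches, then gather in a second loop.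
def get_partialdataset (x_data : List Int) (y_data : List Int) (y_class : Int) : List Int × List Int :=
  let index_list : List Int :=
    (PySem.List.enumerate y_data).foldl
      (fun acc p => if p.2 == y_class then acc ++ [p.1] else acc) []
  let newx : List Int :=
    index_list.foldl (fun acc i => acc ++ [PySem.List.pyGetD x_data i 0]) []
  let newy : List Int :=
    index_list.foldl (fun acc i => acc ++ [PySem.List.pyGetD y_data i 0]) []
  (newx, newy)

-- ===== PORT B =====
-- B: one filtering pass over enumerate(y_data); removes A's intermediate index list and second loop (return-value equivalence).
def get_partialdataset_alt (x_data : List Int) (y_data : List Int) (y_class : Int) : List Int × List Int :=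
  (PySem.List.enumerate y_data).foldl
    (fun (acc : List Int × List Int) p =>
      if p.2 == y_class then (acc.1 ++ [PySem.List.pyGetD x_data p.1 0], acc.2 ++ [p.2]) else acc)
    ([], [])

-- ===== PRECONDITION & SPEC =====
-- Pre_: both programs raise IndexError when some matching position in y_data is out of range for x_data.
def Pre_get_partialdataset (x_data : List Int) (y_data : List Int) (y_class : Int) : Prop :=
  ∀ k : Nat, (h : k < y_data.length) → y_data[k] = y_class → k < x_data.length
instance (x_data : List Int) (y_data : List Int) (y_class : Int) : Decidable (Pre_get_partialdataset x_data y_data y_class) := by unfold Pre_get_partialdataset; infer_instance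
def pvWitness_get_partialdataset : List Int × List Int × Int := ([10, 20, 30], [1, 2, 1], 1)
def Spec_get_partialdataset (x_data : List Int) (y_data : List Int) (y_class : Int) (out : List Int × List Int) : Prop := out = get_partialdataset_alt x_data y_data y_class
instance (x_data : List Int) (y_data : List Int) (y_class : Int) (out : List Int × List Int) : Decidable (Spec_get_partialdataset x_data y_data y_class out) := by unfold Spec_get_partialdataset; infer_instance

-- ===== CLAIM (what is proved, stated in full; the proofs are below) =====
def Claim_equal_get_partialdataset : Prop := ∀ (x_data : List Int) (y_data : List Int) (y_class : Int), Dom_get_partialdataset x_data y_data y_class → Pre_get_partialdataset x_data y_data y_class → Spec_get_partialdataset x_data y_data y_class (get_partialdataset x_data y_data y_class)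

-- ===== LEMMAS AND PROOFS =====

-- B's single pass with a pair accumulator, characterised as two filtered maps.
theorem altFold_eq (y_class : Int) (f : Int × Int → Int) (l : List (Int × Int)) (a b : List Int) :
    l.foldl (fun (acc : List Int × List Int) p =>
      if p.2 == y_class then (acc.1 ++ [f p], acc.2 ++ [p.2]) else acc) (a, b)
    = (a ++ (l.filter (fun p => p.2 == y_class)).map f,
       b ++ (l.filter (fun p => p.2 == y_class)).map (fun p => p.2)) := by
  induction l generalizing a b with
  | nil => simp
  | cons p l ih =>
    rw [List.foldl_cons]
    by_cases hp : (p.2 == y_class) = true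
    · rw [if_pos hp, ih]
      simp [hp]
    · rw [if_neg hp, ih]
      simp [hp]

-- ===== VERDICT (by name: the statement is the Claim_ definition above) =====
theorem get_partialdataset_spec : Claim_equal_get_partialdataset := by
  intro x_data y_data y_class _ _
  unfold Spec_get_partialdataset
  unfold get_partialdataset get_partialdataset_alt
  rw [altFold_eq y_class (fun p => PySem.List.pyGetD x_data p.1 0)]
  simp only [PySem.List.foldl_append_if, PySem.List.foldl_append_singleton_eq_map,
    List.nil_append, List.map_map, Function.comp_def]
  refine Prod.ext rfl ?_
  simp only
  apply List.map_congr_left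
  intro p hp
  have hmem : p ∈ PySem.List.enumerate y_data := List.mem_of_mem_filter hp
  rcases (PySem.List.mem_enumerate_iff _ _ _).1 hmem with ⟨k, hk, rfl⟩
  simp [PySem.List.pyGetD_natCast, List.getD_eq_getElem?_getD, hk]
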